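-- pv_equiv track=rewrite | github.com/Sett66/Crack-Detection | mmcls/SAVSS_dev/models/SAVSS/SAVSS_layer.py | sass
-- ===== SOURCE A (Python) =====
-- def sass(hw_shape):
--     """产生 4 条扫描路径以及相应的 inverse order（沿用了你原始实现思路）"""
--     H, W = hw_shape
--     L = H * W
--     o1, o2, o3, o4 = [], [], [], []
--     o1_inverse = [-1 for _ in range(L)]
--     o2_inverse = [-1 for _ in range(L)]
--     o3_inverse = [-1 for _ in range(L)]
--     o4_inverse = [-1 for _ in range(L)]
--
--     # 蛇形
--     if H % 2 == 1:
--         i, j = H - 1, W - 1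
--         j_d = "left"
--     else:
--         i, j = H - 1, 0
--         j_d = "right"
--     while i > -1:
--         idx = i * W + j
--         o1_inverse[idx] = len(o1)
--         o1.append(idx)
--         if j_d == "right":
--             if j < W - 1:
--                 j += 1
--             else:
--                 i -= 1;
--                 j_d = "left"
--         else:
--             if j > 0:
--                 j -= 1
--             else:
--                 i -= 1;
--                 j_d = "right"
--
--     # 竖向
--     i, j = 0, 0
--     i_d = "down"
--     while j < W:
--         idx = i * W + j
--         o2_inverse[idx] = len(o2)
--         o2.append(idx)
--         if i_d == "down":
--             if i < H - 1:
--                 i += 1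
--             else:
--                 j += 1;
--                 i_d = "up"
--         else:
--             if i > 0:
--                 i -= 1
--             else:
--                 j += 1;
--                 i_d = "down"
--
--     # 对角线
--     for diag in range(H + W - 1):
--         for i in range(min(diag + 1, H)):
--             j = diag - i
--             if j < W:
--                 idx = i * W + j
--                 o3_inverse[idx] = len(o3)
--                 o3.append(idx)
--
--     # 反对角线
--     for diag in range(H + W - 1):
--         for i in range(min(diag + 1, H)):
--             j = diag - i
--             if j < W:
--                 idx = i * W + (W - j - 1)
--                 o4_inverse[idx] = len(o4)
--                 o4.append(idx)
--
--     return (tuple(o1), tuple(o2), tuple(o3), tuple(o4)), \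
--            (tuple(o1_inverse), tuple(o2_inverse), tuple(o3_inverse), tuple(o4_inverse))
-- ===== SOURCE B (Python) =====
-- def sass(hw_shape):
--     """Same 4 scan paths + inverses, built by direct row/column/diagonal comprehensions
--     with the inverse computed in a separate enumerate pass."""
--     H, W = hw_shape
--     L = H * W
--     # snake: rows bottom-up; row r is traversed left-to-right exactly when r is odd
--     o1 = [r * W + c
--           for r in range(H - 1, -1, -1)
--           for c in (range(W) if r % 2 == 1 else range(W - 1, -1, -1))]
--     # vertical snake: columns left-to-right; column c goes top-down exactly when c is even
--     o2 = [r * W + c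
--           for c in range(W)
--           for r in (range(H) if c % 2 == 0 else range(H - 1, -1, -1))]
--     # diagonals: clip the row interval instead of filtering j < W
--     o3 = [i * W + (d - i)
--           for d in range(H + W - 1)
--           for i in range(max(0, d - W + 1), min(d + 1, H))]
--     o4 = [i * W + (W - (d - i) - 1)
--           for d in range(H + W - 1)
--           for i in range(max(0, d - W + 1), min(d + 1, H))]
--
--     def inverse(path):
--         inv = [-1] * L
--         for pos, idx in enumerate(path):
--             inv[idx] = pos
--         return inv
--
--     return (tuple(o1), tuple(o2), tuple(o3), tuple(o4)), \
--            (tuple(inverse(o1)), tuple(inverse(o2)), tuple(inverse(o3)), tuple(inverse(o4)))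
-- ===== Notes on version B (the rewrite author's own statement) =====
-- stated objective: alternative
-- what changed: The two stateful while-loop snakes (mutable i/j/direction flags with fused inverse updates) are replaced by direct row-by-row and column-by-column traversals whose direction is chosen by index parity, the diagonal j<W filter is replaced by a clipped row interval, and each inverse permutation is computed in a separate enumerate pass after the path is complete.
import Mathlib
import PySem

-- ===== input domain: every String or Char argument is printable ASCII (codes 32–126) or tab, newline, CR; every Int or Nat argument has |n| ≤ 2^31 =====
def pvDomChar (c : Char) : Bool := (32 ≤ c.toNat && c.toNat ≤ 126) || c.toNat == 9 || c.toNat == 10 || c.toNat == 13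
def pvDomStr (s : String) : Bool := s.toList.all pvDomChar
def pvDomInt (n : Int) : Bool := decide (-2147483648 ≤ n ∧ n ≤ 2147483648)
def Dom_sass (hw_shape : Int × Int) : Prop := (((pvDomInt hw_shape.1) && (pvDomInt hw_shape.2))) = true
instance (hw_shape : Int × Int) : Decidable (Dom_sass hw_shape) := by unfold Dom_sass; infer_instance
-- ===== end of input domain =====

-- B is an 'alternative': the two while-loop snakes become direct row/column traversals whose
-- direction is chosen by parity, the diagonal filter becomes a clipped range, and each inverse
-- permutation is computed in a separate enumerate pass instead of fused in-loop updates.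

-- ===== PORT A =====
-- 'o_inverse[idx] = len(o); o.append(idx)': pySetD is exact when idx is in range;
-- Python raises IndexError on an out-of-range idx, and Pre_sass excludes exactly those inputs.
def pvPush (s : List Int × List Int) (idx : Int) : List Int × List Int :=
  (s.1 ++ [idx], PySem.List.pySetD s.2 idx (s.1.length : Int))

-- the snake while-loop ('while i > -1'); the fuel only makes the recursion total:
-- sass passes more fuel than the loop can consume on any input admitted by Pre_sass
def sassSnake (W : Int) : Nat → Int → Int → Bool → (List Int × List Int) → (List Int × List Int)
  | 0, _, _, _, s => s
  | fuel+1, i, j, dright, s =>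
    if i > -1 then
      let s' := pvPush s (i * W + j)
      if dright then
        if j < W - 1 then sassSnake W fuel i (j+1) true s'
        else sassSnake W fuel (i-1) j false s'
      else
        if j > 0 then sassSnake W fuel i (j-1) false s'
        else sassSnake W fuel (i-1) j true s'
    else s

-- the vertical while-loop ('while j < W')
def sassVert (H W : Int) : Nat → Int → Int → Bool → (List Int × List Int) → (List Int × List Int)
  | 0, _, _, _, s => s
  | fuel+1, i, j, ddown, s =>
    if j < W then
      let s' := pvPush s (i * W + j)
      if ddown then
        if i < H - 1 then sassVert H W fuel (i+1) j true s'
        else sassVert H W fuel i (j+1) false s'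
      else
        if i > 0 then sassVert H W fuel (i-1) j false s'
        else sassVert H W fuel i (j+1) true s'
    else s

-- diagonal nested for-loops (idx = i*W + j, filtered by j < W)
def sassDiag (H W : Int) (s0 : List Int × List Int) : List Int × List Int :=
  (PySem.List.pyRange 0 (H + W - 1) 1).foldl (fun s diag =>
    (PySem.List.pyRange 0 (min (diag + 1) H) 1).foldl (fun s i =>
      if diag - i < W then pvPush s (i * W + (diag - i)) else s) s) s0

-- anti-diagonal nested for-loops (idx = i*W + (W - j - 1))
def sassAdiag (H W : Int) (s0 : List Int × List Int) : List Int × List Int :=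
  (PySem.List.pyRange 0 (H + W - 1) 1).foldl (fun s diag =>
    (PySem.List.pyRange 0 (min (diag + 1) H) 1).foldl (fun s i =>
      if diag - i < W then pvPush s (i * W + (W - (diag - i) - 1)) else s) s) s0

def sass (hw_shape : Int × Int) : (List Int × List Int × List Int × List Int) × (List Int × List Int × List Int × List Int) :=
  let H := hw_shape.1
  let W := hw_shape.2
  let inv0 : List Int := List.replicate (H * W).toNat (-1)
  let fuel := (H * W).toNat + 1
  let s1 :=
    if PySem.Int.mod H 2 == 1 then sassSnake W fuel (H-1) (W-1) false ([], inv0)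
    else sassSnake W fuel (H-1) 0 true ([], inv0)
  let s2 := sassVert H W fuel 0 0 true ([], inv0)
  let s3 := sassDiag H W ([], inv0)
  let s4 := sassAdiag H W ([], inv0)
  ((s1.1, s2.1, s3.1, s4.1), (s1.2, s2.2, s3.2, s4.2))

-- ===== PORT B =====
def pvRowIdx (W r : Int) : List Int :=
  (if PySem.Int.mod r 2 == 1 then PySem.List.pyRange 0 W 1 else PySem.List.pyRange (W-1) (-1) (-1)).map
    (fun c => r * W + c)

def pvColIdx (H W c : Int) : List Int :=
  (if PySem.Int.mod c 2 == 0 then PySem.List.pyRange 0 H 1 else PySem.List.pyRange (H-1) (-1) (-1)).map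
    (fun r => r * W + c)

def pvDiagIdx (H W d : Int) : List Int :=
  (PySem.List.pyRange (max 0 (d - W + 1)) (min (d + 1) H) 1).map (fun i => i * W + (d - i))

def pvAdiagIdx (H W d : Int) : List Int :=
  (PySem.List.pyRange (max 0 (d - W + 1)) (min (d + 1) H) 1).map (fun i => i * W + (W - (d - i) - 1))

-- inv = [-1]*L; for pos, idx in enumerate(path): inv[idx] = pos
def pvInverse (L : Int) (path : List Int) : List Int :=
  (PySem.List.enumerate path 0).foldl (fun inv pi => PySem.List.pySetD inv pi.2 pi.1)
    (List.replicate L.toNat (-1))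

def sass_alt (hw_shape : Int × Int) : (List Int × List Int × List Int × List Int) × (List Int × List Int × List Int × List Int) :=
  let H := hw_shape.1
  let W := hw_shape.2
  let L := H * W
  let o1 := (PySem.List.pyRange (H-1) (-1) (-1)).flatMap (pvRowIdx W)
  let o2 := (PySem.List.pyRange 0 W 1).flatMap (pvColIdx H W)
  let o3 := (PySem.List.pyRange 0 (H + W - 1) 1).flatMap (pvDiagIdx H W)
  let o4 := (PySem.List.pyRange 0 (H + W - 1) 1).flatMap (pvAdiagIdx H W)
  ((o1, o2, o3, o4), (pvInverse L o1, pvInverse L o2, pvInverse L o3, pvInverse L o4))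

-- ===== PRECONDITION & SPEC =====
-- Pre_sass holds exactly where the Python A returns: on mixed-sign shapes (one of H, W
-- positive, the other ≤ 0) A raises IndexError writing into an empty/short inverse list.
def Pre_sass (hw_shape : Int × Int) : Prop :=
  (1 ≤ hw_shape.1 ∧ 1 ≤ hw_shape.2) ∨ (hw_shape.1 ≤ 0 ∧ hw_shape.2 ≤ 0)
instance (hw_shape : Int × Int) : Decidable (Pre_sass hw_shape) := by unfold Pre_sass; infer_instance
def pvWitness_sass : (Int × Int) := (3, 4)

def Spec_sass (hw_shape : Int × Int) (out : (List Int × List Int × List Int × List Int) × (List Int × List Int × List Int × List Int)) : Prop := out = sass_alt hw_shape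
instance (hw_shape : Int × Int) (out : (List Int × List Int × List Int × List Int) × (List Int × List Int × List Int × List Int)) : Decidable (Spec_sass hw_shape out) := by unfold Spec_sass; infer_instance

-- ===== CLAIM (what is proved, stated in full; the proofs are below) =====
def Claim_equal_sass : Prop := ∀ (hw_shape : Int × Int), Dom_sass hw_shape → Pre_sass hw_shape → Spec_sass hw_shape (sass hw_shape)

-- ===== LEMMAS AND PROOFS =====

def pvPushes (s : List Int × List Int) (idxs : List Int) : List Int × List Int :=
  idxs.foldl pvPush s

theorem pvPushes_append (s : List Int × List Int) (a b : List Int) :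
    pvPushes s (a ++ b) = pvPushes (pvPushes s a) b := by
  simp [pvPushes, List.foldl_append]

-- fused 'set at len, then append' = append the whole path, then replay the inverse
-- updates from an enumerate pass
theorem pvPushes_spec (idxs : List Int) : ∀ (o inv : List Int),
    pvPushes (o, inv) idxs =
      (o ++ idxs,
       (PySem.List.enumerate idxs (o.length : Int)).foldl
         (fun inv pi => PySem.List.pySetD inv pi.2 pi.1) inv) := by
  induction idxs with
  | nil => intro o inv; simp [pvPushes, PySem.List.enumerate_nil]
  | cons x xs ih =>
    intro o inv
    have h1 : pvPushes (o, inv) (x :: xs) = pvPushes (pvPush (o, inv) x) xs := rfl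
    rw [h1]
    simp only [pvPush]
    rw [ih]
    simp [PySem.List.enumerate_cons]

theorem sassSnake_exit (W : Int) (fuel : Nat) (i j : Int) (d : Bool) (s : List Int × List Int)
    (h : i ≤ -1) : sassSnake W fuel i j d s = s := by
  cases fuel with
  | zero => rfl
  | succ n => simp [sassSnake, show ¬ i > -1 by omega]

theorem sassVert_exit (H W : Int) (fuel : Nat) (i j : Int) (d : Bool) (s : List Int × List Int)
    (h : W ≤ j) : sassVert H W fuel i j d s = s := by
  cases fuel with
  | zero => rfl
  | succ n => simp [sassVert, show ¬ j < W by omega]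

-- one rightward row of the snake
theorem snake_right (W : Int) : ∀ (n fuel : Nat) (i j : Int)
    (s : List Int × List Int), j = W - 1 - (n : Int) → 0 ≤ j → 0 ≤ i →
    sassSnake W (fuel + (n+1)) i j true s =
      sassSnake W fuel (i-1) (W-1) false
        (pvPushes s ((PySem.List.pyRange j W 1).map (fun c => i * W + c))) := by
  intro n
  induction n with
  | zero =>
    intro fuel i j s hj hj0 hi
    have hr : PySem.List.pyRange j W 1 = [j] := by
      rw [PySem.List.pyRange_one_cons (by omega), PySem.List.pyRange_one_eq_nil (by omega)]
    rw [hr]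
    have hj' : j = W - 1 := by omega
    show sassSnake W (fuel+1) i j true s = _
    rw [sassSnake]
    simp only [show i > -1 by omega, if_true, show ¬ (j < W - 1) by omega, if_false]
    subst hj'
    rfl
  | succ n ih =>
    intro fuel i j s hj hj0 hi
    have hr : PySem.List.pyRange j W 1 = j :: PySem.List.pyRange (j+1) W 1 :=
      PySem.List.pyRange_one_cons (by omega)
    show sassSnake W (fuel+(n+1)+1) i j true s = _
    rw [sassSnake]
    simp only [show i > -1 by omega, if_true, show j < W - 1 by omega, if_true]
    rw [ih fuel i (j+1) _ (by omega) (by omega) hi, hr]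
    rfl

-- one leftward row of the snake
theorem snake_left (W : Int) : ∀ (n fuel : Nat) (i j : Int)
    (s : List Int × List Int), j = (n : Int) → 0 ≤ i →
    sassSnake W (fuel + (n+1)) i j false s =
      sassSnake W fuel (i-1) 0 true
        (pvPushes s ((PySem.List.pyRange j (-1) (-1)).map (fun c => i * W + c))) := by
  intro n
  induction n with
  | zero =>
    intro fuel i j s hj hi
    have h0 : j = 0 := by omega
    subst h0
    have hr : PySem.List.pyRange (0:Int) (-1) (-1) = [0] := by
      rw [PySem.List.pyRange_neg_one_cons (by omega), PySem.List.pyRange_neg_one_eq_nil (by omega)]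
    rw [hr]
    show sassSnake W (fuel+1) i 0 false s = _
    rw [sassSnake]
    simp only [show i > -1 by omega, if_true, show ¬ ((0:Int) > 0) by omega, if_false]
    rfl
  | succ n ih =>
    intro fuel i j s hj hi
    have hr : PySem.List.pyRange j (-1) (-1) = j :: PySem.List.pyRange (j-1) (-1) (-1) :=
      PySem.List.pyRange_neg_one_cons (by omega)
    show sassSnake W (fuel+(n+1)+1) i j false s = _
    rw [sassSnake]
    simp only [show i > -1 by omega, if_true, show j > 0 by omega, if_true]
    rw [ih fuel i (j-1) _ (by omega) hi, hr]
    rfl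

-- the whole snake, bottom row upward: row i goes left-to-right exactly when i is odd
theorem snake_rows (W : Int) (hW : 1 ≤ W) : ∀ (m fuel : Nat) (s : List Int × List Int),
    sassSnake W (fuel + m * W.toNat) ((m : Int) - 1)
      (if PySem.Int.mod ((m : Int) - 1) 2 == 1 then 0 else W - 1)
      (PySem.Int.mod ((m : Int) - 1) 2 == 1) s =
    pvPushes s ((PySem.List.pyRange ((m : Int) - 1) (-1) (-1)).flatMap (pvRowIdx W)) := by
  intro m
  induction m with
  | zero =>
    intro fuel s
    rw [sassSnake_exit _ _ _ _ _ _ (by omega),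
      PySem.List.pyRange_neg_one_eq_nil (by omega)]
    simp [pvPushes]
  | succ m ih =>
    intro fuel s
    have hi : ((m+1 : Nat) : Int) - 1 = (m : Int) := by push_cast; omega
    rw [hi]
    have hW' : W.toNat = (W-1).toNat + 1 := by omega
    have hfuel : fuel + (m+1) * W.toNat = (fuel + m * W.toNat) + ((W-1).toNat + 1) := by
      rw [hW']; ring
    rw [hfuel]
    have hflat : PySem.List.pyRange ((m:Int)) (-1) (-1) = (m:Int) :: PySem.List.pyRange ((m:Int)-1) (-1) (-1) :=
      PySem.List.pyRange_neg_one_cons (by omega)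
    rw [hflat, List.flatMap_cons, pvPushes_append]
    by_cases hpar : (PySem.Int.mod ((m:Int)) 2 == 1) = true
    · simp only [hpar, if_true]
      rw [snake_right W ((W-1).toNat) _ (m:Int) 0 s (by omega) (by omega) (by omega)]
      have hnext : (PySem.Int.mod ((m:Int) - 1) 2 == 1) = false := by
        rw [PySem.Int.mod_eq_emod_of_pos (by omega)] at hpar ⊢
        simp only [beq_iff_eq, beq_eq_false_iff_ne, ne_eq] at hpar ⊢
        omega
      have := ih (fuel) (pvPushes s (pvRowIdx W (m:Int)))
      rw [hnext] at this
      simp only [Bool.false_eq_true, if_false] at this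
      rw [← this]
      congr 1
      simp only [pvRowIdx, hpar, if_true]
    · have hpar' : (PySem.Int.mod ((m:Int)) 2 == 1) = false := by
        simpa using hpar
      simp only [hpar', Bool.false_eq_true, if_false]
      rw [snake_left W ((W-1).toNat) _ (m:Int) (W-1) s (by omega) (by omega)]
      have hnext : (PySem.Int.mod ((m:Int) - 1) 2 == 1) = true := by
        rw [PySem.Int.mod_eq_emod_of_pos (by omega)] at hpar' ⊢
        simp only [beq_iff_eq, beq_eq_false_iff_ne, ne_eq] at hpar' ⊢
        omega
      have := ih (fuel) (pvPushes s (pvRowIdx W (m:Int)))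
      rw [hnext] at this
      simp only [if_true] at this
      rw [← this]
      congr 1
      simp only [pvRowIdx, hpar', Bool.false_eq_true, if_false]

-- one downward column of the vertical snake
theorem vert_down (H W : Int) : ∀ (n fuel : Nat) (i j : Int)
    (s : List Int × List Int), i = H - 1 - (n : Int) → 0 ≤ i → j < W →
    sassVert H W (fuel + (n+1)) i j true s =
      sassVert H W fuel (H-1) (j+1) false
        (pvPushes s ((PySem.List.pyRange i H 1).map (fun r => r * W + j))) := by
  intro n
  induction n with
  | zero =>
    intro fuel i j s hi hi0 hj
    have hr : PySem.List.pyRange i H 1 = [i] := by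
      rw [PySem.List.pyRange_one_cons (by omega), PySem.List.pyRange_one_eq_nil (by omega)]
    rw [hr]
    have hi' : i = H - 1 := by omega
    show sassVert H W (fuel+1) i j true s = _
    rw [sassVert]
    simp only [show j < W by omega, if_true, show ¬ (i < H - 1) by omega, if_false]
    subst hi'
    rfl
  | succ n ih =>
    intro fuel i j s hi hi0 hj
    have hr : PySem.List.pyRange i H 1 = i :: PySem.List.pyRange (i+1) H 1 :=
      PySem.List.pyRange_one_cons (by omega)
    show sassVert H W (fuel+(n+1)+1) i j true s = _
    rw [sassVert]
    simp only [show j < W by omega, if_true, show i < H - 1 by omega, if_true]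
    rw [ih fuel (i+1) j _ (by omega) (by omega) hj, hr]
    rfl

-- one upward column of the vertical snake
theorem vert_up (H W : Int) : ∀ (n fuel : Nat) (i j : Int)
    (s : List Int × List Int), i = (n : Int) → j < W →
    sassVert H W (fuel + (n+1)) i j false s =
      sassVert H W fuel 0 (j+1) true
        (pvPushes s ((PySem.List.pyRange i (-1) (-1)).map (fun r => r * W + j))) := by
  intro n
  induction n with
  | zero =>
    intro fuel i j s hi hj
    have h0 : i = 0 := by omega
    subst h0
    have hr : PySem.List.pyRange (0:Int) (-1) (-1) = [0] := by
      rw [PySem.List.pyRange_neg_one_cons (by omega), PySem.List.pyRange_neg_one_eq_nil (by omega)]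
    rw [hr]
    show sassVert H W (fuel+1) 0 j false s = _
    rw [sassVert]
    simp only [show j < W by omega, if_true, show ¬ ((0:Int) > 0) by omega, if_false]
    rfl
  | succ n ih =>
    intro fuel i j s hi hj
    have hr : PySem.List.pyRange i (-1) (-1) = i :: PySem.List.pyRange (i-1) (-1) (-1) :=
      PySem.List.pyRange_neg_one_cons (by omega)
    show sassVert H W (fuel+(n+1)+1) i j false s = _
    rw [sassVert]
    simp only [show j < W by omega, if_true, show i > 0 by omega, if_true]
    rw [ih fuel (i-1) j _ (by omega) hj, hr]
    rfl

-- the whole vertical snake, left column onward: column j goes top-down exactly when j is even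
theorem vert_cols (H W : Int) (hH : 1 ≤ H) : ∀ (m fuel : Nat) (s : List Int × List Int)
    (j : Int), j = W - (m : Int) →
    sassVert H W (fuel + m * H.toNat)
      (if PySem.Int.mod j 2 == 0 then 0 else H - 1) j
      (PySem.Int.mod j 2 == 0) s =
    pvPushes s ((PySem.List.pyRange j W 1).flatMap (pvColIdx H W)) := by
  intro m
  induction m with
  | zero =>
    intro fuel s j hj
    rw [sassVert_exit _ _ _ _ _ _ _ (by omega),
      PySem.List.pyRange_one_eq_nil (by omega)]
    simp [pvPushes]
  | succ m ih =>
    intro fuel s j hj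
    have hj' : j < W := by omega
    have hH' : H.toNat = (H-1).toNat + 1 := by omega
    have hfuel : fuel + (m+1) * H.toNat = (fuel + m * H.toNat) + ((H-1).toNat + 1) := by
      rw [hH']; ring
    rw [hfuel]
    have hflat : PySem.List.pyRange j W 1 = j :: PySem.List.pyRange (j+1) W 1 :=
      PySem.List.pyRange_one_cons (by omega)
    rw [hflat, List.flatMap_cons, pvPushes_append]
    by_cases hpar : (PySem.Int.mod j 2 == 0) = true
    · simp only [hpar, if_true]
      rw [vert_down H W ((H-1).toNat) _ 0 j s (by omega) (by omega) hj']
      have hnext : (PySem.Int.mod (j+1) 2 == 0) = false := by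
        rw [PySem.Int.mod_eq_emod_of_pos (by omega)] at hpar ⊢
        simp only [beq_iff_eq, beq_eq_false_iff_ne, ne_eq] at hpar ⊢
        omega
      have := ih fuel (pvPushes s (pvColIdx H W j)) (j+1) (by omega)
      rw [hnext] at this
      simp only [Bool.false_eq_true, if_false] at this
      rw [← this]
      congr 1
      simp only [pvColIdx, hpar, if_true]
    · have hpar' : (PySem.Int.mod j 2 == 0) = false := by simpa using hpar
      simp only [hpar', Bool.false_eq_true, if_false]
      rw [vert_up H W ((H-1).toNat) _ (H-1) j s (by omega) hj']
      have hnext : (PySem.Int.mod (j+1) 2 == 0) = true := by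
        rw [PySem.Int.mod_eq_emod_of_pos (by omega)] at hpar' ⊢
        simp only [beq_iff_eq, beq_eq_false_iff_ne, ne_eq] at hpar' ⊢
        omega
      have := ih fuel (pvPushes s (pvColIdx H W j)) (j+1) (by omega)
      rw [hnext] at this
      simp only [if_true] at this
      rw [← this]
      congr 1
      simp only [pvColIdx, hpar', Bool.false_eq_true, if_false]

-- the diagonal filter 'if j < W' keeps exactly the clipped row interval
theorem diag_filter (H W d : Int) :
    ((PySem.List.pyRange 0 (min (d + 1) H) 1).filter (fun i => decide (d - i < W))) =
      PySem.List.pyRange (max 0 (d - W + 1)) (min (d + 1) H) 1 := by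
  by_cases h : min (d + 1) H ≤ max 0 (d - W + 1)
  · rw [PySem.List.pyRange_one_eq_nil h, List.filter_eq_nil_iff]
    intro i hi
    rw [PySem.List.mem_pyRange_one] at hi
    simp only [decide_eq_true_eq]
    omega
  · rw [PySem.List.pyRange_one_append 0 (max 0 (d - W + 1)) (min (d + 1) H) (by omega) (by omega),
      List.filter_append]
    have h1 : ((PySem.List.pyRange 0 (max 0 (d - W + 1)) 1).filter (fun i => decide (d - i < W))) = [] := by
      rw [List.filter_eq_nil_iff]
      intro i hi
      rw [PySem.List.mem_pyRange_one] at hi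
      simp only [decide_eq_true_eq]
      omega
    have h2 : ((PySem.List.pyRange (max 0 (d - W + 1)) (min (d + 1) H) 1).filter (fun i => decide (d - i < W))) =
        PySem.List.pyRange (max 0 (d - W + 1)) (min (d + 1) H) 1 := by
      rw [List.filter_eq_self]
      intro i hi
      rw [PySem.List.mem_pyRange_one] at hi
      simp only [decide_eq_true_eq]
      exact of_decide_eq_true (by simp only [decide_eq_true_eq]; omega)
    rw [h1, h2, List.nil_append]

theorem foldl_if_push (f : Int → Int) (P : Int → Prop) [DecidablePred P] (xs : List Int) :
    ∀ (s : List Int × List Int),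
    xs.foldl (fun s x => if P x then pvPush s (f x) else s) s =
      pvPushes s ((xs.filter (fun x => decide (P x))).map f) := by
  induction xs with
  | nil => intro s; simp [pvPushes]
  | cons x xs ih =>
    intro s
    by_cases h : P x <;> simp [List.foldl_cons, h, ih, pvPushes]

theorem foldl_pushes_flatMap (g : Int → List Int) (xs : List Int) :
    ∀ (s : List Int × List Int),
    xs.foldl (fun s d => pvPushes s (g d)) s = pvPushes s (xs.flatMap g) := by
  induction xs with
  | nil => intro s; simp [pvPushes]
  | cons x xs ih => intro s; simp [List.foldl_cons, ih, pvPushes_append]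

theorem diag_full (H W : Int) (s0 : List Int × List Int) :
    sassDiag H W s0 = pvPushes s0 ((PySem.List.pyRange 0 (H + W - 1) 1).flatMap (pvDiagIdx H W)) := by
  unfold sassDiag
  have hbody : (fun (s : List Int × List Int) (diag : Int) =>
      (PySem.List.pyRange 0 (min (diag + 1) H) 1).foldl (fun s i =>
        if diag - i < W then pvPush s (i * W + (diag - i)) else s) s) =
      (fun s diag => pvPushes s (pvDiagIdx H W diag)) := by
    funext s d
    rw [foldl_if_push (fun i => i * W + (d - i)) (fun i => d - i < W)]
    unfold pvDiagIdx
    rw [diag_filter]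
  rw [hbody, foldl_pushes_flatMap]

theorem adiag_full (H W : Int) (s0 : List Int × List Int) :
    sassAdiag H W s0 = pvPushes s0 ((PySem.List.pyRange 0 (H + W - 1) 1).flatMap (pvAdiagIdx H W)) := by
  unfold sassAdiag
  have hbody : (fun (s : List Int × List Int) (diag : Int) =>
      (PySem.List.pyRange 0 (min (diag + 1) H) 1).foldl (fun s i =>
        if diag - i < W then pvPush s (i * W + (W - (diag - i) - 1)) else s) s) =
      (fun s diag => pvPushes s (pvAdiagIdx H W diag)) := by
    funext s d
    rw [foldl_if_push (fun i => i * W + (W - (d - i) - 1)) (fun i => d - i < W)]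
    unfold pvAdiagIdx
    rw [diag_filter]
  rw [hbody, foldl_pushes_flatMap]

theorem snake_full (H W : Int) (hH : 1 ≤ H) (hW : 1 ≤ W) (s : List Int × List Int) :
    (if PySem.Int.mod H 2 == 1 then sassSnake W ((H*W).toNat + 1) (H-1) (W-1) false s
     else sassSnake W ((H*W).toNat + 1) (H-1) 0 true s) =
    pvPushes s ((PySem.List.pyRange (H-1) (-1) (-1)).flatMap (pvRowIdx W)) := by
  have hfuel : (H*W).toNat + 1 = 1 + H.toNat * W.toNat := by
    rw [Int.toNat_mul (by omega) (by omega)]; omega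
  have key := snake_rows W hW H.toNat 1 s
  have hm : ((H.toNat : Int)) - 1 = H - 1 := by omega
  rw [hm] at key
  rw [hfuel]
  by_cases hpar : (PySem.Int.mod (H-1) 2 == 1) = true
  · have hA : (PySem.Int.mod H 2 == 1) = false := by
      rw [PySem.Int.mod_eq_emod_of_pos (by omega)] at hpar ⊢
      simp only [beq_iff_eq, beq_eq_false_iff_ne, ne_eq] at hpar ⊢
      omega
    rw [hA]
    simp only [Bool.false_eq_true, if_false]
    rw [hpar] at key
    simpa using key
  · have hpar' : (PySem.Int.mod (H-1) 2 == 1) = false := by simpa using hpar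
    have hA : (PySem.Int.mod H 2 == 1) = true := by
      rw [PySem.Int.mod_eq_emod_of_pos (by omega)] at hpar' ⊢
      simp only [beq_iff_eq, beq_eq_false_iff_ne, ne_eq] at hpar' ⊢
      omega
    rw [hA]
    simp only [if_true]
    rw [hpar'] at key
    simpa using key

theorem vert_full (H W : Int) (hH : 1 ≤ H) (hW : 1 ≤ W) (s : List Int × List Int) :
    sassVert H W ((H*W).toNat + 1) 0 0 true s =
    pvPushes s ((PySem.List.pyRange 0 W 1).flatMap (pvColIdx H W)) := by
  have hfuel : (H*W).toNat + 1 = 1 + W.toNat * H.toNat := by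
    rw [Int.toNat_mul (by omega) (by omega)]; ring
  have key := vert_cols H W hH W.toNat 1 s 0 (by omega)
  have h0 : (PySem.Int.mod (0:Int) 2 == 0) = true := by
    rw [PySem.Int.mod_eq_emod_of_pos (by omega)]
    decide
  rw [h0] at key
  simp only [if_true] at key
  rw [hfuel]
  exact key

theorem sass_eq (hw : Int × Int) (hpre : Pre_sass hw) : sass hw = sass_alt hw := by
  obtain ⟨H, W⟩ := hw
  rcases hpre with ⟨hH, hW⟩ | ⟨hH, hW⟩
  · show sass (H, W) = sass_alt (H, W)
    unfold sass sass_alt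
    dsimp only
    rw [snake_full H W hH hW, vert_full H W hH hW, diag_full, adiag_full,
      pvPushes_spec, pvPushes_spec, pvPushes_spec, pvPushes_spec]
    simp [pvInverse]
  · show sass (H, W) = sass_alt (H, W)
    unfold sass sass_alt
    dsimp only
    have e1 : PySem.List.pyRange (H-1) (-1) (-1) = [] :=
      PySem.List.pyRange_neg_one_eq_nil (by omega)
    have e2 : PySem.List.pyRange 0 W 1 = [] :=
      PySem.List.pyRange_one_eq_nil (by omega)
    have e3 : PySem.List.pyRange 0 (H + W - 1) 1 = [] :=
      PySem.List.pyRange_one_eq_nil (by omega)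
    have hs1 : ∀ (j : Int) (d : Bool), sassSnake W ((H*W).toNat + 1) (H-1) j d
        ([], List.replicate (H*W).toNat (-1)) = ([], List.replicate (H*W).toNat (-1)) :=
      fun j d => sassSnake_exit _ _ _ _ _ _ (by omega)
    have hs2 : sassVert H W ((H*W).toNat + 1) 0 0 true
        ([], List.replicate (H*W).toNat (-1)) = ([], List.replicate (H*W).toNat (-1)) :=
      sassVert_exit _ _ _ _ _ _ _ (by omega)
    rw [diag_full, adiag_full, e1, e2, e3, hs2]
    split <;>
      simp [hs1, pvPushes, pvInverse, PySem.List.enumerate_nil]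

-- ===== VERDICT =====
theorem sass_spec : Claim_equal_sass := by
  intro hw _ hpre
  unfold Spec_sass
  exact sass_eq hw hpre
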